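-- pv_equiv track=rewrite | github.com/tuhin-su/brotcast-chat | modules/functions.py | fillterWord
-- ===== SOURCE A (Python) =====
-- def fillterWord(badWord:list, string:str):
--     string=string.split(" ")
--     for badword in badWord:
--         for i, word in enumerate(string):
--             if badword.lower() == word.lower():
--                 inde= string.index(word)
--                 count= len(string[inde])-3
--                 start= string[inde][:2]
--                 end= string[inde][-1]
--                 if count <= 0:
--                     count=count+2
--                     start= string[inde][:1]
--                     end=""
--                 mid= ("*" * count)
--                 string[inde] = (start+mid+end)
--     return (" ".join(string))
-- ===== SOURCE B (Python) =====
-- def fillterWord(badWord: list, string: str):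
--     bad = {b.lower() for b in badWord}
--     out = []
--     for w in string.split(" "):
--         if w.lower() in bad:
--             n = len(w)
--             if n <= 3:
--                 out.append(w[:1] + "*" * (n - 1))
--             else:
--                 out.append(w[:2] + "*" * (n - 3) + w[-1])
--         else:
--             out.append(w)
--     return " ".join(out)
-- ===== Notes on version B (the rewrite author's own statement) =====
-- stated objective: faster
-- what changed: A runs the word list once per badword (nested loops) and re-scans it with list.index on every hit; B builds one set of lowercased badwords and makes a single pass over the words, censoring each word in place by a membership test.
-- crash fix: A raises IndexError (string[inde][-1] on the empty word) exactly when "" is in badWord and "" occurs among string.split(" "); B returns the string with non-empty matching words censored and empty words left as "". — e.g. on fillterWord([""], "bad "): A raises IndexError, B returns "bad "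
import Mathlib
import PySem

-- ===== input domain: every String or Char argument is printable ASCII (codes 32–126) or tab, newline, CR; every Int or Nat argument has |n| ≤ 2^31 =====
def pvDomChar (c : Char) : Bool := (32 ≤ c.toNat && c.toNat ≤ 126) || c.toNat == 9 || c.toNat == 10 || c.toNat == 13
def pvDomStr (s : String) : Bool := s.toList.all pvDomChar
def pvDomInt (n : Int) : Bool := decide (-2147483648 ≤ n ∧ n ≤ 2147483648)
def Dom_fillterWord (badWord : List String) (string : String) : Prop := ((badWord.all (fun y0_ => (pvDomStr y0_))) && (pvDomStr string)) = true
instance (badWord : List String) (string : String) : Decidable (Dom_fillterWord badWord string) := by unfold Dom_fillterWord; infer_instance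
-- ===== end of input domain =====

-- ===== PORT A =====
-- B replaces A's per-badword rescans (nested loops + list.index) by one badword set and a single pass over the words.
-- Python string ops via PySem: [:2]/[:1] are Str.slice, [-1] is Str.pyGet? (none = IndexError, excluded by Pre_),
-- "*"*count is replicate count.toNat (negative count gives ""), '+' on str is append of code points.
def fillterWordCensor (word : String) : String :=
  let count : Int := PySem.Str.len word - 3
  let start : String := PySem.Str.slice word none (some 2)
  let stop : String := ((PySem.Str.pyGet? word (-1)).map (fun c => String.ofList [c])).getD ""
  let cse : Int × String × String :=
    if count ≤ 0 then (count + 2, PySem.Str.slice word none (some 1), "") else (count, start, stop)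
  let mid : String := String.ofList (List.replicate cse.1.toNat '*')
  String.ofList (cse.2.1.toList ++ mid.toList ++ cse.2.2.toList)

-- body of A's inner loop 'for i, word in enumerate(string)' (the list is written in place; its length never changes)
def fillterWordPass (badword : String) (s : List String) (i : Nat) : List String :=
  let word := s.getD i ""
  if PySem.Str.lower badword == PySem.Str.lower word then
    let inde := (PySem.List.index? s word).getD 0  -- word = s[i] is in s: list.index never raises
    s.set inde (fillterWordCensor word)
  else s

def fillterWord (badWord : List String) (string : String) : String :=
  let ws : List String := (PySem.Str.split? string " ").getD []  -- sep " " is nonempty: split? never returns none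
  let res : List String := badWord.foldl (fun s badword =>
    (List.range s.length).foldl (fillterWordPass badword) s) ws
  PySem.Str.join " " res

-- ===== PORT B =====
def fillterWordCensorB (w : String) : String :=
  let n : Nat := w.toList.length
  if n ≤ 3 then String.ofList (w.toList.take 1 ++ List.replicate (n - 1) '*')
  else String.ofList (w.toList.take 2 ++ List.replicate (n - 3) '*' ++ [w.toList.getLastD '*'])
  -- getLastD is w[-1]; the default is never read since 3 < n

def fillterWord_alt (badWord : List String) (string : String) : String :=
  let bad : PySem.Set String := PySem.Set.ofList (badWord.map PySem.Str.lower)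
  let ws : List String := (PySem.Str.split? string " ").getD []
  PySem.Str.join " " (ws.map (fun w =>
    if PySem.Set.contains bad (PySem.Str.lower w) then fillterWordCensorB w else w))

-- ===== PRECONDITION & SPEC =====
-- Pre_ excludes exactly the inputs on which Python A raises IndexError: "" among the badwords AND "" among the split words.
def Pre_fillterWord (badWord : List String) (string : String) : Prop :=
  ¬ ("" ∈ badWord ∧ "" ∈ (PySem.Str.split? string " ").getD [])
instance (badWord : List String) (string : String) : Decidable (Pre_fillterWord badWord string) := by
  unfold Pre_fillterWord; infer_instance
def pvWitness_fillterWord : List String × String := (["bad", "Cat"], "no Bad cat x")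

-- A raises IndexError (string[inde][-1] on the empty word) exactly when "" is in badWord and "" occurs among
-- string.split(" "); B returns the string with non-empty matching words censored and empty words left as "".
def Raises_fillterWord (badWord : List String) (string : String) : Prop :=
  "" ∈ badWord ∧ "" ∈ (PySem.Str.split? string " ").getD []
instance (badWord : List String) (string : String) : Decidable (Raises_fillterWord badWord string) := by
  unfold Raises_fillterWord; infer_instance
def pvRaiseWitness_fillterWord : List String × String := ([""], "bad ")
def pvRaiseWitnessOut_fillterWord : String := "bad "

def Spec_fillterWord (badWord : List String) (string : String) (out : String) : Prop := out = fillterWord_alt badWord string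
instance (badWord : List String) (string : String) (out : String) : Decidable (Spec_fillterWord badWord string out) := by unfold Spec_fillterWord; infer_instance

-- ===== CLAIM (what is proved, stated in full; the proofs are below) =====
def Claim_equal_fillterWord : Prop := ∀ (badWord : List String) (string : String), Dom_fillterWord badWord string → Pre_fillterWord badWord string → Spec_fillterWord badWord string (fillterWord badWord string)
def Claim_raises_fillterWord : Prop := (∀ (badWord : List String) (string : String), Dom_fillterWord badWord string → Raises_fillterWord badWord string → ¬ Pre_fillterWord badWord string) ∧ (Dom_fillterWord (pvRaiseWitness_fillterWord.1) (pvRaiseWitness_fillterWord.2) ∧ Raises_fillterWord (pvRaiseWitness_fillterWord.1) (pvRaiseWitness_fillterWord.2) ∧ fillterWord_alt (pvRaiseWitness_fillterWord.1) (pvRaiseWitness_fillterWord.2) = pvRaiseWitnessOut_fillterWord)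

-- ===== LEMMAS AND PROOFS =====

-- the per-word action of one badword pass (matching words get censored, idempotently)
def fwPhi (b w : String) : String :=
  if PySem.Str.lower b == PySem.Str.lower w then fillterWordCensorB w else w

theorem fwCensor_eq (w : String) : fillterWordCensor w = fillterWordCensorB w := by
  have hlen : w.toList.length = w.length := by simp
  by_cases h : w.length ≤ 3
  · have hc : (PySem.Str.len w - 3 : Int) ≤ 0 := by rw [PySem.Str.len_eq]; omega
    apply String.toList_inj.mp
    simp only [fillterWordCensor, fillterWordCensorB, if_pos hc, if_pos (hlen ▸ h), String.toList_ofList]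
    simp [pysem]
    omega
  · have hc : ¬ (PySem.Str.len w - 3 : Int) ≤ 0 := by rw [PySem.Str.len_eq]; omega
    have hne : w.toList ≠ [] := by intro hn; apply h; rw [← hlen, hn]; simp
    obtain ⟨c, hc2⟩ := List.getLast?_isSome.mpr hne |> Option.isSome_iff_exists.mp
    apply String.toList_inj.mp
    simp only [fillterWordCensor, fillterWordCensorB, if_neg hc, if_neg (hlen ▸ h), String.toList_ofList]
    simp only [PySem.Str.toList_slice, PySem.Chars.slice_eq_listSlice, PySem.Str.pyGet?_eq,
      PySem.Chars.pyGet?_eq_listPyGet?, PySem.List.pyGet?_neg_one, hc2, Option.map_some,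
      Option.getD_some, String.toList_ofList, List.getLastD_eq_getLast?]
    rw [PySem.List.slice_to (xs := w.toList) (b := 2) (by norm_num)]
    have hlw : (PySem.Str.len w - 3).toNat = w.toList.length - 3 := by rw [PySem.Str.len_eq]; omega
    rw [hlw]
    norm_num
    rfl

theorem fwCensor_idem (w : String) : fillterWordCensorB (fillterWordCensorB w) = fillterWordCensorB w := by
  rcases hl : w.toList with _ | ⟨a, t⟩
  · simp [fillterWordCensorB, hl]
  · by_cases h : (a :: t).length ≤ 3
    · simp only [fillterWordCensorB, hl, if_pos h, String.toList_ofList]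
      have h1 : (a :: t).take 1 = [a] := rfl
      rw [h1]
      have h2 : (([a] ++ List.replicate ((a :: t).length - 1) '*')).length = (a :: t).length := by
        simp
      rw [h2, if_pos h]
      simp
    · rcases t with _ | ⟨b, t'⟩
      · simp at h
      · simp only [fillterWordCensorB, hl, if_neg h, String.toList_ofList]
        have h3 : (a::b::t').take 2 = [a, b] := rfl
        rw [h3]
        have h2 : (([a,b] ++ List.replicate ((a::b::t').length - 3) '*' ++ [(a::b::t').getLastD '*'])).length = (a::b::t').length := by
          simp at h ⊢; omega
        rw [h2, if_neg h]
        have h5 : ([a,b] ++ List.replicate ((a::b::t').length - 3) '*' ++ [(a::b::t').getLastD '*']).take 2 = [a, b] := rfl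
        rw [h5, List.getLastD_concat]

theorem fwStep_eq (b : String) (t : List String) (i : Nat) (hi : i < t.length) :
    fillterWordPass b ((t.take i).map (fwPhi b) ++ t.drop i) i
      = (t.take (i + 1)).map (fwPhi b) ++ t.drop (i + 1) := by
  have hA : ((t.take i).map (fwPhi b)).length = i := by simp; omega
  have hs : ((t.take i).map (fwPhi b) ++ t.drop i).getD i "" = t[i] := by
    rw [List.getD_eq_getElem?_getD, List.getElem?_append_right (by omega), hA]
    simp [List.getElem?_drop, List.getElem?_eq_getElem hi]
  have htake : (t.take (i+1)).map (fwPhi b) = (t.take i).map (fwPhi b) ++ [fwPhi b t[i]] := by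
    conv_lhs => rw [List.take_add_one]
    rw [List.getElem?_eq_getElem hi, List.map_append]
    simp only [Option.toList_some, List.map_cons, List.map_nil]
  have hdrop : t.drop i = t[i] :: t.drop (i+1) := List.drop_eq_getElem_cons hi
  unfold fillterWordPass
  rw [hs]
  by_cases hm : PySem.Str.lower b == PySem.Str.lower t[i]
  · rw [if_pos hm]
    have hsi : ((t.take i).map (fwPhi b) ++ t.drop i)[i]'(by simp; omega) = t[i] := by
      rw [List.getElem_append_right (by omega)]
      simp only [hA, List.getElem_drop]
      congr 1
      omega
    have hmem : t[i] ∈ (t.take i).map (fwPhi b) ++ t.drop i :=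
      List.mem_append_right _ (by rw [hdrop]; exact List.mem_cons_self ..)
    obtain ⟨j, hj⟩ := Option.isSome_iff_exists.mp ((PySem.List.index?_isSome_iff _ _).mpr hmem)
    obtain ⟨hjlt, hsj, hmin⟩ := PySem.List.getElem_of_index?_eq_some hj
    rw [hj]
    have hji : j ≤ i := by
      by_contra hc
      exact hmin i (by omega) hsi
    simp only [Option.getD_some]
    rcases Nat.lt_or_ge j i with hlt | hge
    · -- earlier duplicate: the cell is an already-censored fixed point; the write is a no-op
      have hAj : ((t.take i).map (fwPhi b) ++ t.drop i)[j]'hjlt = fwPhi b (t[j]'(by omega)) := by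
        rw [List.getElem_append_left (by omega)]
        simp [List.getElem_take]
      have hphi : fwPhi b (t[j]'(by omega)) = t[i] := by rw [← hAj, hsj]
      have hmj : PySem.Str.lower b == PySem.Str.lower (t[j]'(by omega)) := by
        by_contra hc
        have : t[j]'(by omega) = t[i] := by
          rw [← hphi]; unfold fwPhi; rw [if_neg hc]
        have heq : PySem.Str.lower b = PySem.Str.lower t[i] := eq_of_beq hm
        exact hc (by rw [this]; exact hm)
      have hcen : fillterWordCensorB t[i] = t[i] := by
        have : fillterWordCensorB (t[j]'(by omega)) = t[i] := by
          rw [← hphi]; unfold fwPhi; rw [if_pos hmj]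
        rw [← this, fwCensor_idem]
      rw [fwCensor_eq, hcen, ← hsj, List.set_getElem_self]
      rw [htake]
      have : fwPhi b t[i] = t[i] := by
        unfold fwPhi; rw [if_pos hm]; exact hcen
      rw [this, hdrop]
      simp
    · have hji' : j = i := by omega
      subst hji'
      rw [List.set_append_right _ _ (by omega), hA, hdrop]
      simp only [Nat.sub_self, List.set_cons_zero]
      rw [htake, fwCensor_eq]
      have : fwPhi b t[j] = fillterWordCensorB t[j] := by unfold fwPhi; rw [if_pos hm]
      rw [← this]
      simp
  · rw [if_neg hm]
    rw [htake]
    have : fwPhi b t[i] = t[i] := by unfold fwPhi; rw [if_neg hm]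
    rw [this, hdrop]
    simp

theorem fwInner_aux (b : String) (t : List String) :
    ∀ (k i : Nat), i + k = t.length →
      (List.range' i k).foldl (fillterWordPass b) ((t.take i).map (fwPhi b) ++ t.drop i)
        = t.map (fwPhi b) := by
  intro k
  induction k with
  | zero =>
      intro i hi
      have h1 : t.drop i = [] := List.drop_eq_nil_of_le (by omega)
      have h2 : t.take i = t := List.take_of_length_le (by omega)
      simp [h1, h2]
  | succ k ih =>
      intro i hi
      rw [List.range'_succ, List.foldl_cons, fwStep_eq b t i (by omega)]
      exact ih (i + 1) (by omega)

theorem fwInner_eq (b : String) (t : List String) :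
    (List.range t.length).foldl (fillterWordPass b) t = t.map (fwPhi b) := by
  have := fwInner_aux b t t.length 0 (by omega)
  simpa [List.range_eq_range'] using this

theorem fwChain_fix (bs : List String) (w : String) :
    bs.foldl (fun v b => fwPhi b v) (fillterWordCensorB w) = fillterWordCensorB w := by
  induction bs generalizing w with
  | nil => rfl
  | cons b bs ih =>
      simp only [List.foldl_cons, fwPhi]
      split
      · rw [fwCensor_idem]; exact ih w
      · exact ih w

theorem fwChain_eq (bs : List String) (w : String) :
    bs.foldl (fun v b => fwPhi b v) w =
      if (bs.map PySem.Str.lower).contains (PySem.Str.lower w) then fillterWordCensorB w else w := by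
  induction bs generalizing w with
  | nil => rfl
  | cons b bs ih =>
      rw [List.foldl_cons]
      by_cases h : PySem.Str.lower b = PySem.Str.lower w
      · have h1 : fwPhi b w = fillterWordCensorB w := by simp [fwPhi, h]
        rw [h1, fwChain_fix]
        simp [h]
      · have h1 : fwPhi b w = w := by simp [fwPhi, h]
        have h2' : (PySem.Str.lower w == PySem.Str.lower b) = false :=
          beq_eq_false_iff_ne.mpr (fun hc => h hc.symm)
        rw [h1, ih]
        simp only [List.map_cons, List.contains_cons, h2', Bool.false_or]

theorem fwFoldMap (bs : List String) (t : List String) :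
    bs.foldl (fun s b => s.map (fwPhi b)) t = t.map (fun w => bs.foldl (fun v b => fwPhi b v) w) := by
  induction bs generalizing t with
  | nil => simp
  | cons b bs ih => simp [ih, List.map_map]

-- ===== VERDICT (by name: the statement is the Claim_ definition above) =====
theorem fillterWord_spec : Claim_equal_fillterWord := by
  intro badWord string _ _
  unfold Spec_fillterWord fillterWord fillterWord_alt
  dsimp only
  congr 1
  rw [PySem.List.foldl_congr_mem badWord _ (fun s b => s.map (fwPhi b)) _
        (fun acc x _ => fwInner_eq x acc),
      fwFoldMap]
  apply List.map_congr_left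
  intro w _
  rw [fwChain_eq]
  have hset : PySem.Set.contains (PySem.Set.ofList (badWord.map PySem.Str.lower)) (PySem.Str.lower w)
      = (badWord.map PySem.Str.lower).contains (PySem.Str.lower w) := by
    simp [pysem]
  rw [hset]

@[simp] theorem fillterWord_raises : Claim_raises_fillterWord := by
  unfold Claim_raises_fillterWord
  exact ⟨fun b s _ hr hp => hp hr, by decide⟩
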